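-- pv_equiv track=rewrite | github.com/yuus95/Algorithm | 백준강의-문제/브루트포스/16968번 차량 번호판1/a2.py | go
-- ===== SOURCE A (Python) =====
-- def go(s,index,last):
--     if len(s) == index:
--         return 1
--
--     start = ord('a') if s[index] == 'c' else ord('0')
--     end = ord('z') if s[index] == 'c' else ord('9')
--
--     ans = 0
--     for i in range(start,end+1):
--         if i != last:
--             ans +=go(s,index+1,i)
--     return ans
-- ===== SOURCE B (Python) =====
-- def go(s, index, last):
--     # One linear pass: multiply the number of admissible symbols per position.
--     result = 1
--     prev = last
--     for pos in range(index, len(s)):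
--         lo, hi = (ord('a'), ord('z')) if s[pos] == 'c' else (ord('0'), ord('9'))
--         size = hi - lo + 1
--         if lo <= prev <= hi:
--             size -= 1
--         result *= size
--         prev = lo
--     return result
-- ===== Notes on version B (the rewrite author's own statement) =====
-- stated objective: faster
-- what changed: Replaces the exponential recursion that enumerates every plate with a single left-to-right pass multiplying per-position choice counts (size of the symbol block, minus 1 when the previous value lies in that block).
import Mathlib
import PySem

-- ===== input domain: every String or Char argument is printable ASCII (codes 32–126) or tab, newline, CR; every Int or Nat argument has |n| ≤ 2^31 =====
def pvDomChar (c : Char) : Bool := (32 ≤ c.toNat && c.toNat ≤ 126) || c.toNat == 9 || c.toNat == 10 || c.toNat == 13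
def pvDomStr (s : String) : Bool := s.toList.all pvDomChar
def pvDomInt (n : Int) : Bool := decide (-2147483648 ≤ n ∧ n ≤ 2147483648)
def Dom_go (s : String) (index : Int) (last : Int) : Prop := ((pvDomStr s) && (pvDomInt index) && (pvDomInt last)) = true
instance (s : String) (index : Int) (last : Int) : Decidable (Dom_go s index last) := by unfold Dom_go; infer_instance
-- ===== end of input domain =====

-- B replaces A's exponential enumeration of every plate by one linear pass that
-- multiplies the per-position choice counts (block size, minus 1 when the previous
-- value lies in the current block); measured asymptotically faster.


-- ===== PORT A =====
-- A's recursion, totalized with fuel = (len(s) + 1 - index).toNat; fuel never runs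
-- out on inputs satisfying Pre_go (the 0-fuel junk value is never claimed about).
def goAFuel (cs : List Char) (fuel : Nat) (index : Int) (last : Int) : Int :=
  match fuel with
  | 0 => 0
  | fuel + 1 =>
    if (cs.length : Int) = index then 1
    else
      match PySem.List.pyGet? cs index with
      | none => 0   -- Python raises IndexError here (excluded by Pre_go)
      | some c =>
        let start : Int := if c = 'c' then 97 else 48
        let stop : Int := if c = 'c' then 122 else 57
        (PySem.List.pyRange start (stop + 1) 1).foldl
          (fun ans i => if i ≠ last then ans + goAFuel cs fuel (index + 1) i else ans) 0

def go (s : String) (index : Int) (last : Int) : Int :=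
  goAFuel s.toList (((s.toList.length : Int) + 1 - index).toNat) index last

-- ===== PORT B =====
-- Source B's loop: foldl over range(index, len(s)) with state (result, prev).
def goAltStep (cs : List Char) (st : Int × Int) (pos : Int) : Int × Int :=
  let c := PySem.List.pyGetD cs pos ' '
  let lo : Int := if c = 'c' then 97 else 48
  let hi : Int := if c = 'c' then 122 else 57
  let size0 : Int := hi - lo + 1
  let size : Int := if lo ≤ st.2 ∧ st.2 ≤ hi then size0 - 1 else size0
  (st.1 * size, lo)

def go_alt (s : String) (index : Int) (last : Int) : Int :=
  ((PySem.List.pyRange index (s.toList.length : Int) 1).foldl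
    (goAltStep s.toList) (1, last)).1

-- ===== PRECONDITION & SPEC =====
-- Pre_go excludes exactly the inputs on which Python A raises IndexError:
-- index > len(s) (s[index] out of range, recursion never terminates it) and
-- index < -len(s); on every other input A returns normally.
def Pre_go (s : String) (index : Int) (last : Int) : Prop :=
  -(s.toList.length : Int) ≤ index ∧ index ≤ (s.toList.length : Int)
instance (s : String) (index : Int) (last : Int) : Decidable (Pre_go s index last) := by
  unfold Pre_go; infer_instance

def pvWitness_go : String × Int × Int := ("cc7", 0, -1)

def Spec_go (s : String) (index : Int) (last : Int) (out : Int) : Prop := out = go_alt s index last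
instance (s : String) (index : Int) (last : Int) (out : Int) : Decidable (Spec_go s index last out) := by
  unfold Spec_go; infer_instance

-- ===== CLAIM (what is proved, stated in full; the proofs are below) =====
def Claim_equal_go : Prop := ∀ (s : String) (index : Int) (last : Int),
  Dom_go s index last → Pre_go s index last → Spec_go s index last (go s index last)

-- ===== LEMMAS AND PROOFS =====

-- B's loop value from position pos with previous value prev (result accumulator = 1).
def loopB (cs : List Char) (pos : Int) (prev : Int) : Int :=
  ((PySem.List.pyRange pos (cs.length : Int) 1).foldl (goAltStep cs) (1, prev)).1

-- The result accumulator factors out of B's fold.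
theorem loopB_factor (cs : List Char) (l : List Int) :
    ∀ (r prev : Int), (l.foldl (goAltStep cs) (r, prev)).1 = r * (l.foldl (goAltStep cs) (1, prev)).1 := by
  induction l with
  | nil => intro r prev; simp
  | cons x t ih =>
    intro r prev
    simp only [List.foldl_cons, goAltStep]
    rw [ih, ih (1 * _)]
    ring

-- One step of B's loop at an in-range position.
theorem loopB_step (cs : List Char) (pos prev : Int) (c : Char) (lo hi : Int)
    (hget : PySem.List.pyGet? cs pos = some c)
    (hlo : lo = if c = 'c' then 97 else 48) (hhi : hi = if c = 'c' then 122 else 57)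
    (hlt : pos < (cs.length : Int)) :
    loopB cs pos prev = (if lo ≤ prev ∧ prev ≤ hi then hi - lo else hi - lo + 1) * loopB cs (pos + 1) lo := by
  have hd : PySem.List.pyGetD cs pos ' ' = c := by simp [PySem.List.pyGetD, hget]
  unfold loopB
  rw [PySem.List.pyRange_one_cons hlt]
  simp only [List.foldl_cons, goAltStep, hd, ← hlo, ← hhi]
  rw [loopB_factor]
  split_ifs <;> ring

-- Only the FIRST position's membership test sees prev: two previous values whose
-- membership in the first block agrees give the same loop value.
theorem loopB_prev_irrel (cs : List Char) (pos : Int) (prev₁ prev₂ : Int) (c : Char)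
    (hget : PySem.List.pyGet? cs pos = some c)
    (hmem : ((if c = 'c' then (97 : Int) else 48) ≤ prev₁ ∧ prev₁ ≤ (if c = 'c' then (122 : Int) else 57)) ↔
            ((if c = 'c' then (97 : Int) else 48) ≤ prev₂ ∧ prev₂ ≤ (if c = 'c' then (122 : Int) else 57)))
    (hlt : pos < (cs.length : Int)) :
    loopB cs pos prev₁ = loopB cs pos prev₂ := by
  rw [loopB_step cs pos prev₁ c _ _ hget rfl rfl hlt,
      loopB_step cs pos prev₂ c _ _ hget rfl rfl hlt]
  congr 1
  by_cases h : (if c = 'c' then (97 : Int) else 48) ≤ prev₁ ∧ prev₁ ≤ (if c = 'c' then (122 : Int) else 57)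
  · rw [if_pos h, if_pos (hmem.mp h)]
  · rw [if_neg h, if_neg (fun h2 => h (hmem.mpr h2))]

-- A's inner loop with a constant body Q sums Q once per range element different from last.
theorem foldl_count_ne (last Q : Int) (l : List Int) :
    ∀ (r : Int), l.foldl (fun ans i => if i ≠ last then ans + Q else ans) r
      = r + ((l.length : Int) - (l.count last : Int)) * Q := by
  induction l with
  | nil => intro r; simp
  | cons x t ih =>
    intro r
    simp only [List.foldl_cons, List.count_cons, List.length_cons]
    by_cases hx : x = last
    · rw [if_neg (by simp [hx]), ih]
      have hb : (x == last) = true := by simp [hx]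
      rw [hb]
      push_cast
      simp
    · rw [if_pos hx, ih]
      have hb : (x == last) = false := by simp [hx]
      rw [hb]
      push_cast
      ring

theorem count_pyRange (a b x : Int) :
    ((PySem.List.pyRange a b 1).count x : Int) = if a ≤ x ∧ x < b then 1 else 0 := by
  by_cases h : a ≤ x ∧ x < b
  · rw [if_pos h]
    have hm : x ∈ PySem.List.pyRange a b 1 := PySem.List.mem_pyRange_one.mpr h
    rw [List.count_eq_one_of_mem (PySem.List.nodup_pyRange_one a b) hm]
    rfl
  · rw [if_neg h]
    have hm : x ∉ PySem.List.pyRange a b 1 := fun hx => h (PySem.List.mem_pyRange_one.mp hx)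
    rw [List.count_eq_zero_of_not_mem hm]
    rfl

-- Main invariant: on in-range positions, A's fueled recursion equals B's loop.
theorem main_inv (cs : List Char) :
    ∀ (fuel : Nat) (pos last : Int), -(cs.length : Int) ≤ pos → pos ≤ (cs.length : Int) →
      fuel = (((cs.length : Int) + 1 - pos)).toNat →
      goAFuel cs fuel pos last = loopB cs pos last := by
  intro fuel
  induction fuel with
  | zero => intro pos last h1 h2 hf; omega
  | succ fuel ih =>
    intro pos last h1 h2 hf
    by_cases hend : (cs.length : Int) = pos
    · -- end of string: empty product
      simp only [goAFuel, if_pos hend]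
      unfold loopB
      rw [← hend, PySem.List.pyRange_one_eq_nil (le_refl _)]
      simp
    · have hlt : pos < (cs.length : Int) := by omega
      -- the character at pos exists
      have hinr : PySem.Raise.InRange cs.length pos := ⟨h1, hlt⟩
      obtain ⟨c, hget⟩ : ∃ c, PySem.List.pyGet? cs pos = some c := by
        cases hgc : PySem.List.pyGet? cs pos with
        | none => exact absurd hinr ((PySem.List.pyGet?_eq_none_iff cs pos).mp hgc)
        | some c => exact ⟨c, rfl⟩
      simp only [goAFuel, if_neg hend, hget]
      set lo : Int := if c = 'c' then 97 else 48 with hlo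
      set hi : Int := if c = 'c' then 122 else 57 with hhi
      have hfuel' : fuel = (((cs.length : Int) + 1 - (pos + 1))).toNat := by omega
      -- rewrite each recursive call via the induction hypothesis, then collapse
      -- the prev-dependence: every chosen i lies in [lo, hi], and membership of
      -- i and of lo in the NEXT block coincide (blocks are equal or disjoint).
      have hQ : ∀ acc : Int, ∀ i ∈ PySem.List.pyRange lo (hi + 1) 1,
          (fun ans j => if j ≠ last then ans + goAFuel cs fuel (pos + 1) j else ans) acc i
          = (fun ans j => if j ≠ last then ans + loopB cs (pos + 1) lo else ans) acc i := by
        intro acc i hi_mem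
        obtain ⟨hge, hlt2⟩ := PySem.List.mem_pyRange_one.mp hi_mem
        have hrange : lo ≤ i ∧ i ≤ hi := ⟨hge, by omega⟩
        have hrec : goAFuel cs fuel (pos + 1) i = loopB cs (pos + 1) i :=
          ih (pos + 1) i (by omega) (by omega) hfuel'
        have hsame : loopB cs (pos + 1) i = loopB cs (pos + 1) lo := by
          by_cases hend2 : (cs.length : Int) = pos + 1
          · unfold loopB
            rw [← hend2, PySem.List.pyRange_one_eq_nil (le_refl _)]
            rfl
          · have hlt3 : pos + 1 < (cs.length : Int) := by omega
            obtain ⟨c', hget'⟩ : ∃ c', PySem.List.pyGet? cs (pos + 1) = some c' := by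
              cases hgc : PySem.List.pyGet? cs (pos + 1) with
              | none => exact absurd ⟨by omega, hlt3⟩ ((PySem.List.pyGet?_eq_none_iff cs (pos + 1)).mp hgc)
              | some c' => exact ⟨c', rfl⟩
            apply loopB_prev_irrel cs (pos + 1) i lo c' hget' _ hlt3
            have hlo_mem : lo ≤ lo ∧ lo ≤ hi := ⟨le_refl _, by by_cases hc : c = 'c' <;> simp [hlo, hhi, hc]⟩
            by_cases hc : c = 'c' <;> by_cases hc' : c' = 'c' <;>
              simp only [hlo, hhi, hc, hc', if_pos, if_false] at hrange hlo_mem ⊢ <;>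
              constructor <;> intro h <;> omega
        simp only [hrec, hsame]
      rw [PySem.List.foldl_congr_mem _ _ _ _ hQ, foldl_count_ne, count_pyRange,
          PySem.List.length_pyRange_one]
      rw [loopB_step cs pos last c lo hi hget hlo hhi hlt]
      have hlen : (((hi + 1 - lo)).toNat : Int) = hi + 1 - lo := by
        by_cases hc : c = 'c' <;> simp [hlo, hhi, hc]
      rw [hlen]
      have hcond : (lo ≤ last ∧ last < hi + 1) ↔ (lo ≤ last ∧ last ≤ hi) := by omega
      by_cases hlast : lo ≤ last ∧ last ≤ hi
      · rw [if_pos (hcond.mpr hlast), if_pos hlast]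
        ring
      · rw [if_neg (fun h => hlast (hcond.mp h)), if_neg hlast]
        ring

-- ===== VERDICT (by name: the statement is the Claim_ definition above) =====
theorem go_spec : Claim_equal_go := by
  intro s index last _hdom hpre
  unfold Spec_go go go_alt
  have := main_inv s.toList (((s.toList.length : Int) + 1 - index)).toNat index last hpre.1 hpre.2 rfl
  rw [this]
  rfl
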